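-- pv_equiv track=rewrite | github.com/AntonOstman/aoc24 | day6/sol2.py | get_position
-- ===== SOURCE A (Python) =====
-- def get_position(lines):
--     pos = (0,0)
--     dir = 0
--     for i, line in enumerate(lines):
--         for j, letter in enumerate(line):
--             if letter == "v":
--                 pos = (j,i)
--                 dir = 'S'
--             elif letter == ">":
--                 pos = (j,i)
--                 dir = 'W'
--             elif letter == "<":
--                 pos = (j,i)
--                 dir = 'E'
--             elif letter == "^":
--                 pos = (j,i)
--                 dir = 'N'
--
--     return pos, dir
-- ===== SOURCE B (Python) =====
-- def get_position(lines):
--     dirs = {'v': 'S', '>': 'W', '<': 'E', '^': 'N'}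
--     for i in range(len(lines) - 1, -1, -1):
--         line = lines[i]
--         for j in range(len(line) - 1, -1, -1):
--             d = dirs.get(line[j])
--             if d is not None:
--                 return (j, i), d
--     return (0, 0), 0
-- ===== Notes on version B (the rewrite author's own statement) =====
-- stated objective: alternative
-- what changed: B scans the grid in reverse row-major order and returns on the first marker found (the last one in forward order), instead of A's exhaustive forward pass that overwrites the result on every marker.
-- outside the precondition, e.g. on get_position(['..', '..']): A returns ((0, 0), 0), B returns ((0, 0), 0)
import Mathlib
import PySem

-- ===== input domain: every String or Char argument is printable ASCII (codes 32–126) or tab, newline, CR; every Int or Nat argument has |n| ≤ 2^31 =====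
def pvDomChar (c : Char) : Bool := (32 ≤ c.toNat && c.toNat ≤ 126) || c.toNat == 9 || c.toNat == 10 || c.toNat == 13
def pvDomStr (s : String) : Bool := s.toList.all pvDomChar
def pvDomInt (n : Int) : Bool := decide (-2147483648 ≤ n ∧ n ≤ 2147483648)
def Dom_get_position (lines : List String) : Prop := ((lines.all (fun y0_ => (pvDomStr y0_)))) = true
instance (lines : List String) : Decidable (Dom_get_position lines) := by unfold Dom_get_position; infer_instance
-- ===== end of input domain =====

-- B scans the grid in reverse row-major order and returns on the first marker found (= last in
-- forward order), replacing A's exhaustive forward overwrite pass (alternative structure, same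
-- cost). Equivalence of the return value on grids containing at least one marker (Pre_ below).

-- ===== PORT A =====
-- Literal port of A's double fold with an overwriting accumulator. Python's initial dir is the
-- int 0, which has no String value; it is ported as "" — Pre_ guarantees it is overwritten.
def get_position (lines : List String) : (Int × Int) × String :=
  lines.zipIdx.foldl
    (fun st li =>
      li.1.toList.zipIdx.foldl
        (fun st cj =>
          if cj.1 = 'v' then (((cj.2 : Int), (li.2 : Int)), "S")
          else if cj.1 = '>' then (((cj.2 : Int), (li.2 : Int)), "W")
          else if cj.1 = '<' then (((cj.2 : Int), (li.2 : Int)), "E")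
          else if cj.1 = '^' then (((cj.2 : Int), (li.2 : Int)), "N")
          else st)
        st)
    ((0, 0), "")

-- ===== PORT B =====
-- Source B's dirs.get(letter)
def pvDirOf (c : Char) : Option String :=
  if c = 'v' then some "S"
  else if c = '>' then some "W"
  else if c = '<' then some "E"
  else if c = '^' then some "N"
  else none

-- inner reversed loop of Source B: first marker in an already-reversed row
def pvRowScan (i : Nat) : List (Char × Nat) → Option ((Int × Int) × String)
  | [] => none
  | cj :: rest =>
    match pvDirOf cj.1 with
    | some d => some (((cj.2 : Int), (i : Int)), d)
    | none => pvRowScan i rest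

-- outer reversed loop of Source B: rows from last to first, early return on first hit
def pvGridScan : List (String × Nat) → Option ((Int × Int) × String)
  | [] => none
  | li :: rest =>
    match pvRowScan li.2 li.1.toList.zipIdx.reverse with
    | some v => some v
    | none => pvGridScan rest

-- Python B's no-marker default is ((0,0), 0) (int 0, outside Pre_); ported as ((0,0), "").
def get_position_alt (lines : List String) : (Int × Int) × String :=
  (pvGridScan lines.zipIdx.reverse).getD ((0, 0), "")

-- ===== PRECONDITION & SPEC =====
-- Pre_ excludes grids with no guard marker ('v','>','<','^'): there A (and B) return the int 0
-- for dir, which is not a value of the declared String result type.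
def Pre_get_position (lines : List String) : Prop :=
  (lines.any (fun line => line.toList.any (fun c => c = 'v' || c = '>' || c = '<' || c = '^'))) = true
instance (lines : List String) : Decidable (Pre_get_position lines) := by
  unfold Pre_get_position; infer_instance

def pvWitness_get_position : List String := [".>", "<^"]

def Spec_get_position (lines : List String) (out : (Int × Int) × String) : Prop := out = get_position_alt lines
instance (lines : List String) (out : (Int × Int) × String) : Decidable (Spec_get_position lines out) := by unfold Spec_get_position; infer_instance

-- ===== CLAIM (what is proved, stated in full; the proofs are below) =====
def Claim_equal_get_position : Prop := ∀ (lines : List String), Dom_get_position lines → Pre_get_position lines → Spec_get_position lines (get_position lines)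

-- ===== LEMMAS AND PROOFS =====

-- generic: first `some` of g along a list
def pvFirstSome {α β : Type} (g : α → Option β) : List α → Option β
  | [] => none
  | x :: xs =>
    match g x with
    | some v => some v
    | none => pvFirstSome g xs

theorem pvFirstSome_append {α β : Type} (g : α → Option β) (u v : List α) :
    pvFirstSome g (u ++ v) =
      match pvFirstSome g u with
      | some w => some w
      | none => pvFirstSome g v := by
  induction u with
  | nil => simp [pvFirstSome]
  | cons x xs ih =>
    simp only [List.cons_append, pvFirstSome]
    cases g x <;> simp [ih]

-- a foldl whose step is "overwrite with g x if it fires" equals the first hit of the REVERSED list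
theorem pvFoldl_getD {α β : Type} (g : α → Option β) :
    ∀ (l : List α) (st : β),
      l.foldl (fun s x => (g x).getD s) st = (pvFirstSome g l.reverse).getD st := by
  intro l
  induction l with
  | nil => intro st; simp [pvFirstSome]
  | cons x xs ih =>
    intro st
    simp only [List.foldl_cons, List.reverse_cons, ih, pvFirstSome_append]
    cases h : pvFirstSome g xs.reverse <;> cases hg : g x <;> simp [pvFirstSome, hg]

def pvGA (i : Nat) (cj : Char × Nat) : Option ((Int × Int) × String) :=
  match pvDirOf cj.1 with
  | some d => some (((cj.2 : Int), (i : Int)), d)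
  | none => none

theorem pvStepA_eq (i : Nat) (st : (Int × Int) × String) (cj : Char × Nat) :
    (if cj.1 = 'v' then (((cj.2 : Int), (i : Int)), "S")
     else if cj.1 = '>' then (((cj.2 : Int), (i : Int)), "W")
     else if cj.1 = '<' then (((cj.2 : Int), (i : Int)), "E")
     else if cj.1 = '^' then (((cj.2 : Int), (i : Int)), "N")
     else st) = (pvGA i cj).getD st := by
  unfold pvGA pvDirOf
  split_ifs <;> rfl

theorem pvRowScan_eq (i : Nat) (l : List (Char × Nat)) :
    pvRowScan i l = pvFirstSome (pvGA i) l := by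
  induction l with
  | nil => rfl
  | cons cj rest ih =>
    simp only [pvRowScan, pvFirstSome, pvGA]
    cases pvDirOf cj.1 <;> simp [ih]

def pvGRow (li : String × Nat) : Option ((Int × Int) × String) :=
  pvFirstSome (pvGA li.2) li.1.toList.zipIdx.reverse

theorem pvGridScan_eq (l : List (String × Nat)) :
    pvGridScan l = pvFirstSome pvGRow l := by
  induction l with
  | nil => rfl
  | cons li rest ih =>
    simp only [pvGridScan, pvFirstSome, pvGRow, pvRowScan_eq]
    cases pvFirstSome (pvGA li.2) li.1.toList.zipIdx.reverse <;> simp [ih]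

theorem pvInner_eq (li : String × Nat) (st : (Int × Int) × String) :
    li.1.toList.zipIdx.foldl
        (fun st cj =>
          if cj.1 = 'v' then (((cj.2 : Int), (li.2 : Int)), "S")
          else if cj.1 = '>' then (((cj.2 : Int), (li.2 : Int)), "W")
          else if cj.1 = '<' then (((cj.2 : Int), (li.2 : Int)), "E")
          else if cj.1 = '^' then (((cj.2 : Int), (li.2 : Int)), "N")
          else st)
        st = (pvGRow li).getD st := by
  have h : (fun (st : (Int × Int) × String) (cj : Char × Nat) =>
      if cj.1 = 'v' then (((cj.2 : Int), (li.2 : Int)), "S")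
      else if cj.1 = '>' then (((cj.2 : Int), (li.2 : Int)), "W")
      else if cj.1 = '<' then (((cj.2 : Int), (li.2 : Int)), "E")
      else if cj.1 = '^' then (((cj.2 : Int), (li.2 : Int)), "N")
      else st) = fun st cj => (pvGA li.2 cj).getD st := by
    funext st cj; exact pvStepA_eq li.2 st cj
  rw [h, pvFoldl_getD]
  rfl

theorem pv_eq (lines : List String) : get_position lines = get_position_alt lines := by
  unfold get_position get_position_alt
  have h : (fun (st : (Int × Int) × String) (li : String × Nat) =>
      li.1.toList.zipIdx.foldl
        (fun st cj =>
          if cj.1 = 'v' then (((cj.2 : Int), (li.2 : Int)), "S")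
          else if cj.1 = '>' then (((cj.2 : Int), (li.2 : Int)), "W")
          else if cj.1 = '<' then (((cj.2 : Int), (li.2 : Int)), "E")
          else if cj.1 = '^' then (((cj.2 : Int), (li.2 : Int)), "N")
          else st)
        st) = fun st li => (pvGRow li).getD st := by
    funext st li; exact pvInner_eq li st
  rw [h, pvFoldl_getD, pvGridScan_eq]

-- ===== VERDICT (by name: the statement is the Claim_ definition above) =====
theorem get_position_spec : Claim_equal_get_position := by
  intro lines _ _
  unfold Spec_get_position
  exact pv_eq lines
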